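-- pv_equiv track=rewrite | github.com/Ryrden/ICMC-SCC0210 | 08-bitmask/quadrados.py | solve
-- ===== SOURCE A (Python) =====
-- def solve(palitos):
--     if sum(palitos) % 4 != 0:
--         return False
--     tamanho_alvo = sum(palitos) // 4
--     palitos.sort(reverse=True)
--     total_palitos = len(palitos)
--     dp = [-1] * (1 << total_palitos)
--
--     def can_form_square(mask, current_sum, count):
--         if dp[mask] != -1:
--             return dp[mask]
--
--         if count == 4:
--             return True
--
--         if current_sum > tamanho_alvo:
--             return False
--
--         if current_sum == tamanho_alvo:
--             return can_form_square(mask, 0, count + 1)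
--
--         answer = False
--         for i in range(total_palitos):
--             if not (mask & (1 << i)) and current_sum + palitos[i] <= tamanho_alvo:
--                 if can_form_square(mask | (1 << i), current_sum + palitos[i], count):
--                     answer = True
--                     break
--
--         dp[mask] = answer
--         return answer
--
--     return can_form_square(0, 0, 0)
-- ===== SOURCE B (Python) =====
-- def solve(palitos):
--     if sum(palitos) % 4 != 0:
--         return False
--     t = sum(palitos) // 4
--     palitos.sort(reverse=True)
--
--     def bt(sticks, b0, b1, b2, b3):
--         if not sticks:
--             return b0 == t and b1 == t and b2 == t and b3 == t
--         p, rest = sticks[0], sticks[1:]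
--         if b0 + p <= t and bt(rest, b0 + p, b1, b2, b3):
--             return True
--         if b1 + p <= t and bt(rest, b0, b1 + p, b2, b3):
--             return True
--         if b2 + p <= t and bt(rest, b0, b1, b2 + p, b3):
--             return True
--         if b3 + p <= t and bt(rest, b0, b1, b2, b3 + p):
--             return True
--         return False
--
--     return bt(palitos, 0, 0, 0, 0)
-- ===== Notes on version B (the rewrite author's own statement) =====
-- stated objective: simpler
-- what changed: Replaces the memoized bitmask DP (2^n dp array, filling one square at a time over masks) with a classic backtracking search that recurses over the stick list and maintains four bucket sums, trying each bucket for the current stick; Pre_ only excludes lists with a negative stick length and total divisible by 4 (negative lengths are outside the natural domain, and there A's <=-target pruning and mask memoisation return accidental values).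
-- outside the precondition, e.g. on solve([-3, 3]): A returns True, B returns False; on solve([3, 3, -1, 5, -2, -3, 7]): A returns False, B returns False
import Mathlib
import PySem

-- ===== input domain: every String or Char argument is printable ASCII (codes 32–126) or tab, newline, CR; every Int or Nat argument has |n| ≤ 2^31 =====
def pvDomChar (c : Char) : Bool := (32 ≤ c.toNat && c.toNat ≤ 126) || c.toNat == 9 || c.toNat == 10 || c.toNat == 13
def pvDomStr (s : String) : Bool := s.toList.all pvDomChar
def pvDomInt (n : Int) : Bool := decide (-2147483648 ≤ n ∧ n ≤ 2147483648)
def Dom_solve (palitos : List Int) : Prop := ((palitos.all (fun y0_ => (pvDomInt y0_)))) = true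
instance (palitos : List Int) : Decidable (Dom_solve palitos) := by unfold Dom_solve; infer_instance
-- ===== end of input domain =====

-- B replaces A's memoized bitmask DP with a four-bucket backtracking over the stick list (simpler, O(n) memory);
-- both versions sort the argument in place in Python (same mutation); the equivalence proved is about the return value.

-- ===== PORT A =====
-- dp, Python's list of -1/True/False indexed by mask, is carried as a Dict Nat Bool (absent key ≡ -1);
-- fuel (n+6) exceeds the recursion depth bound (each call sets a new bit or increments count ≤ 4), so the 0-fuel branch is unreachable.
mutual
def cfs (ps : List Int) (t : Int) (n : Nat) :
    Nat → Nat → Int → Int → PySem.Dict Nat Bool → Bool × PySem.Dict Nat Bool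
  | 0, _, _, _, dp => (false, dp)
  | fuel+1, mask, cs, count, dp =>
    match PySem.Dict.get? dp mask with
    | some v => (v, dp)
    | none =>
      if count = 4 then (true, dp)
      else if t < cs then (false, dp)
      else if cs = t then cfs ps t n fuel mask 0 (count + 1) dp
      else cfsLoop ps t n fuel mask cs count (List.range n) dp
termination_by fuel mask cs count dp => (fuel, 0, 0)

def cfsLoop (ps : List Int) (t : Int) (n : Nat) :
    Nat → Nat → Int → Int → List Nat → PySem.Dict Nat Bool → Bool × PySem.Dict Nat Bool
  | _, mask, _, _, [], dp => (false, PySem.Dict.insert dp mask false)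
  | fuel, mask, cs, count, i :: is, dp =>
    let p := (PySem.List.pyGet? ps (i : Int)).getD 0
    if mask &&& (1 <<< i) = 0 ∧ cs + p ≤ t then
      match cfs ps t n fuel (mask ||| (1 <<< i)) (cs + p) count dp with
      | (true, dp') => (true, PySem.Dict.insert dp' mask true)
      | (false, dp') => cfsLoop ps t n fuel mask cs count is dp'
    else cfsLoop ps t n fuel mask cs count is dp
termination_by fuel mask cs count is dp => (fuel, 1, is.length)
end

def solve (palitos : List Int) : Bool :=
  if PySem.Int.mod palitos.sum 4 ≠ 0 then false
  else
    let t := PySem.Int.floordiv palitos.sum 4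
    let ps := PySem.List.sorted palitos (fun x => x) true
    let n := ps.length
    (cfs ps t n (n + 6) 0 0 0 PySem.Dict.empty).1

-- ===== PORT B =====
def bt (t : Int) : List Int → Int → Int → Int → Int → Bool
  | [], b0, b1, b2, b3 => b0 == t && b1 == t && b2 == t && b3 == t
  | p :: rest, b0, b1, b2, b3 =>
    (decide (b0 + p ≤ t) && bt t rest (b0 + p) b1 b2 b3) ||
    (decide (b1 + p ≤ t) && bt t rest b0 (b1 + p) b2 b3) ||
    (decide (b2 + p ≤ t) && bt t rest b0 b1 (b2 + p) b3) ||
    (decide (b3 + p ≤ t) && bt t rest b0 b1 b2 (b3 + p))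

def solve_alt (palitos : List Int) : Bool :=
  if PySem.Int.mod palitos.sum 4 ≠ 0 then false
  else
    let t := PySem.Int.floordiv palitos.sum 4
    let ps := PySem.List.sorted palitos (fun x => x) true
    bt t ps 0 0 0 0

-- ===== PRECONDITION & SPEC =====
-- Pre_ excludes lists that contain a negative stick length AND whose total is divisible by 4 (where the search runs):
-- negative lengths are outside the task's natural domain, and there A's ≤-target pruning and mask-only memoisation
-- return accidental values; lists with sum not divisible by 4 are admitted (both versions return False at the guard).
def Pre_solve (palitos : List Int) : Prop := (∀ x ∈ palitos, 0 ≤ x) ∨ PySem.Int.mod palitos.sum 4 ≠ 0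
instance (palitos : List Int) : Decidable (Pre_solve palitos) := by unfold Pre_solve; infer_instance
def pvWitness_solve : List Int := [1, 1, 1, 1]
def Spec_solve (palitos : List Int) (out : Bool) : Prop := out = solve_alt palitos
instance (palitos : List Int) (out : Bool) : Decidable (Spec_solve palitos out) := by unfold Spec_solve; infer_instance

-- ===== CLAIM (what is proved, stated in full; the proofs are below) =====
def Claim_equal_solve : Prop := ∀ (palitos : List Int), Dom_solve palitos → Pre_solve palitos → Spec_solve palitos (solve palitos)

-- ===== LEMMAS AND PROOFS =====

-- the stick length used by the ports for index i
def stick (ps : List Int) (i : Nat) : Int := (PySem.List.pyGet? ps (i : Int)).getD 0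

-- indices not yet used by mask
def idxs (n : Nat) (mask : Nat) : List Nat := (List.range n).filter (fun i => ! mask.testBit i)

-- multiset of unused sticks
def Umask (ps : List Int) (mask : Nat) : Multiset Int := ((idxs ps.length mask).map (stick ps) : List Int)

-- Q t U r k : the unused sticks U contain k disjoint groups, the first summing to r, the rest to t each
def Q (t : Int) : Multiset Int → Int → Nat → Prop
  | _, _, 0 => True
  | U, r, k+1 => ∃ V, V ≤ U ∧ V.sum = r ∧ Q t (U - V) t k

-- a reachable state of A's search
def Valid (ps : List Int) (t : Int) (mask : Nat) (cs count : Int) : Prop :=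
  count * t + cs + (Umask ps mask).sum = ps.sum ∧ 0 ≤ cs ∧ cs ≤ t ∧ 0 ≤ count ∧ count ≤ 4 ∧ (count = 4 → cs = 0)

-- the meaning of A's search at a state
def QA (ps : List Int) (t : Int) (mask : Nat) (cs count : Int) : Prop :=
  Q t (Umask ps mask) (t - cs) (4 - count).toNat

-- memo invariant: every cached value is the meaning at some reachable state of its mask
def MemoInv (ps : List Int) (t : Int) (dp : PySem.Dict Nat Bool) : Prop :=
  ∀ m v, PySem.Dict.get? dp m = some v →
    ∃ cs count, Valid ps t m cs count ∧ cs < t ∧ ((v = true) ↔ QA ps t m cs count)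

theorem stick_eq (ps : List Int) (i : Nat) (hi : i < ps.length) : stick ps i = ps[i] := by
  simp [stick, PySem.List.pyGet?_natCast, List.getElem?_eq_getElem hi]

theorem stick_mem (ps : List Int) (i : Nat) (hi : i < ps.length) : stick ps i ∈ ps := by
  rw [stick_eq ps i hi]; exact List.getElem_mem hi

theorem mem_idxs (n mask i : Nat) : i ∈ idxs n mask ↔ i < n ∧ ¬ mask.testBit i := by
  simp [idxs, List.mem_filter, List.mem_range]

theorem nodup_idxs (n mask : Nat) : (idxs n mask).Nodup :=
  (List.nodup_range).filter _

theorem idxs_perm (n mask i : Nat) (hi : i < n) (hb : ¬ mask.testBit i) :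
    List.Perm (idxs n mask) (i :: idxs n (mask ||| (1 <<< i))) := by
  have hbit : ∀ j, (mask ||| (1 <<< i)).testBit j ↔ (mask.testBit j ∨ j = i) := by
    intro j
    rw [Nat.testBit_or, Nat.one_shiftLeft]
    rcases eq_or_ne i j with h | h
    · subst h; simp [Nat.testBit_two_pow_self]
    · simp [Nat.testBit_two_pow_of_ne h, (Ne.symm h)]
  have hnd2 : (i :: idxs n (mask ||| (1 <<< i))).Nodup := by
    refine List.nodup_cons.2 ⟨?_, nodup_idxs _ _⟩
    rw [mem_idxs]
    intro ⟨_, hc⟩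
    exact hc ((hbit i).2 (Or.inr rfl))
  rw [List.perm_ext_iff_of_nodup (nodup_idxs _ _) hnd2]
  intro j
  rcases eq_or_ne j i with h | h
  · subst h; simp [mem_idxs, hi, hb]
  · simp only [List.mem_cons, mem_idxs, hbit, h, or_false]
    tauto

theorem Umask_cons (ps : List Int) (mask i : Nat) (hi : i < ps.length) (hb : ¬ mask.testBit i) :
    Umask ps mask = stick ps i ::ₘ Umask ps (mask ||| (1 <<< i)) := by
  unfold Umask
  have h := (idxs_perm ps.length mask i hi hb).map (stick ps)
  rw [← Multiset.coe_eq_coe] at h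
  simpa using h

theorem Umask_mem (ps : List Int) (mask : Nat) (v : Int) (hv : v ∈ Umask ps mask) :
    ∃ i, i < ps.length ∧ ¬ mask.testBit i ∧ stick ps i = v := by
  simp only [Umask, Multiset.mem_coe, List.mem_map] at hv
  obtain ⟨i, hi, rfl⟩ := hv
  rw [mem_idxs] at hi
  exact ⟨i, hi.1, hi.2, rfl⟩

theorem Umask_nonneg (ps : List Int) (hps : ∀ x ∈ ps, 0 ≤ x) (mask : Nat) :
    ∀ v ∈ Umask ps mask, 0 ≤ v := by
  intro v hv
  obtain ⟨i, hi, _, rfl⟩ := Umask_mem ps mask v hv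
  exact hps _ (stick_mem ps i hi)

theorem idxs_length_or (n mask i : Nat) (hi : i < n) (hb : ¬ mask.testBit i) :
    (idxs n (mask ||| (1 <<< i))).length + 1 = (idxs n mask).length := by
  have := (idxs_perm n mask i hi hb).length_eq
  simpa using this.symm

theorem Umask_zero (ps : List Int) : Umask ps 0 = (ps : Multiset Int) := by
  unfold Umask idxs
  have h1 : (List.range ps.length).filter (fun i => ! (0 : Nat).testBit i) = List.range ps.length := by
    simp [Nat.zero_testBit]
  rw [h1]
  congr 1
  apply List.ext_getElem (by simp)
  intro j h1 h2
  simp [stick_eq ps j (by simpa using h2)]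

theorem and_two_pow_eq_zero (mask i : Nat) : (mask &&& (1 <<< i) = 0) ↔ ¬ mask.testBit i := by
  rw [Nat.one_shiftLeft, Nat.and_two_pow]
  simp [Nat.testBit]

theorem Q_mono (t : Int) (k : Nat) : ∀ (r : Int) (U U' : Multiset Int), U ≤ U' → Q t U r k → Q t U' r k := by
  induction k with
  | zero => intro r U U' _ _; trivial
  | succ k ih =>
    rintro r U U' h ⟨V, hVU, hsum, hQ⟩
    exact ⟨V, le_trans hVU h, hsum, ih t _ _ (tsub_le_tsub_right h V) hQ⟩

theorem Q_shift (t : Int) (U : Multiset Int) (k : Nat) :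
    Q t U 0 (k + 1) ↔ Q t U t k := by
  constructor
  · rintro ⟨V, hVU, hsum, hQ⟩
    exact Q_mono t k t _ _ tsub_le_self hQ
  · intro h
    exact ⟨0, zero_le U, rfl, by simpa using h⟩

-- two reachable states of the same mask have the same meaning
theorem QA_unique (ps : List Int) (t : Int) (ht : 0 < t) (mask : Nat)
    (cs count cs' count' : Int) (h : Valid ps t mask cs count) (h' : Valid ps t mask cs' count') :
    (QA ps t mask cs count ↔ QA ps t mask cs' count') := by
  -- normalise a state with cs = t to (0, count + 1)
  have norm : ∀ cs count, Valid ps t mask cs count →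
      ∃ cs₀ count₀, Valid ps t mask cs₀ count₀ ∧ 0 ≤ cs₀ ∧ cs₀ < t ∧
        (QA ps t mask cs count ↔ QA ps t mask cs₀ count₀) := by
    intro cs count hv
    obtain ⟨hsum, h0, hle, hc0, hc4, hz⟩ := hv
    rcases eq_or_lt_of_le hle with rfl | hlt
    · -- cs = t; then count ≤ 3
      have hc3 : count ≤ 3 := by
        by_contra hc
        have : count = 4 := by omega
        have := hz this; omega
      refine ⟨0, count + 1, ⟨by linarith [hsum], le_refl 0, le_of_lt ht, by omega, by omega, by omega⟩,
        le_refl 0, ht, ?_⟩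
      unfold QA
      have e1 : (4 - count).toNat = (4 - (count + 1)).toNat + 1 := by omega
      rw [e1, sub_self, sub_zero, Q_shift]
    · exact ⟨cs, count, ⟨hsum, h0, hle, hc0, hc4, hz⟩, h0, hlt, Iff.rfl⟩
  obtain ⟨a, b, hv1, ha0, hat, he1⟩ := norm cs count h
  obtain ⟨a', b', hv2, ha0', hat', he2⟩ := norm cs' count' h'
  rw [he1, he2]
  -- uniqueness of the decomposition
  obtain ⟨e1, -, -, -, -, -⟩ := hv1
  obtain ⟨e2, -, -, -, -, -⟩ := hv2
  have hbb : b = b' := by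
    by_contra hne
    rcases lt_or_gt_of_ne hne with hlt | hlt
    · have h1 : b + 1 ≤ b' := by omega
      nlinarith [e1, e2]
    · have h1 : b' + 1 ≤ b := by omega
      nlinarith [e1, e2]
  subst hbb
  have : a = a' := by nlinarith [e1, e2]
  subst this
  exact Iff.rfl

-- the semantic crux: one unfolding of Q matches A's inner loop
theorem Q_step (ps : List Int) (t : Int) (ht : 0 < t) (hps : ∀ x ∈ ps, 0 ≤ x)
    (mask : Nat) (cs count : Int) (hcs0 : 0 ≤ cs) (hcst : cs < t) (hc0 : 0 ≤ count) (hc4 : count < 4) :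
    QA ps t mask cs count ↔
      ∃ i, i < ps.length ∧ ¬ mask.testBit i ∧ cs + stick ps i ≤ t ∧
        QA ps t (mask ||| (1 <<< i)) (cs + stick ps i) count := by
  have e4 : (4 - count).toNat = (3 - count).toNat + 1 := by omega
  set k := (3 - count).toNat with hk
  constructor
  · intro hQ
    unfold QA at hQ
    rw [e4] at hQ
    obtain ⟨V, hVU, hsum, hQ⟩ := hQ
    have hVne : V ≠ 0 := by
      intro h; rw [h] at hsum; simp at hsum; omega
    obtain ⟨v, hvV⟩ := Multiset.exists_mem_of_ne_zero hVne
    have hvU := Multiset.mem_of_le hVU hvV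
    obtain ⟨i, hi, hbit, hsi⟩ := Umask_mem ps mask v hvU
    have hVnn : ∀ x ∈ V, 0 ≤ x := fun x hx =>
      Umask_nonneg ps hps mask x (Multiset.mem_of_le hVU hx)
    have hvle : v ≤ V.sum := Multiset.single_le_sum hVnn v hvV
    have hcons := Umask_cons ps mask i hi hbit
    rw [hsi] at hcons
    refine ⟨i, hi, hbit, by omega, ?_⟩
    unfold QA
    rw [e4]
    refine ⟨V.erase v, ?_, ?_, ?_⟩
    · have := Multiset.erase_le_erase v hVU
      rwa [hcons, Multiset.erase_cons_head] at this
    · have : v + (V.erase v).sum = V.sum := by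
        conv_rhs => rw [← Multiset.cons_erase hvV]
        simp
      rw [hsi]; omega
    · have hUV : Umask ps mask - V = Umask ps (mask ||| (1 <<< i)) - V.erase v := by
        conv_lhs => rw [hcons, ← Multiset.cons_erase hvV]
        rw [Multiset.sub_cons, Multiset.erase_cons_head]
      rwa [hUV] at hQ
  · rintro ⟨i, hi, hbit, hle, hQ⟩
    unfold QA at hQ ⊢
    rw [e4] at hQ ⊢
    obtain ⟨V, hVU, hsum, hQ⟩ := hQ
    have hcons := Umask_cons ps mask i hi hbit
    refine ⟨stick ps i ::ₘ V, ?_, ?_, ?_⟩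
    · rw [hcons]; exact Multiset.cons_le_cons _ hVU
    · simp [hsum]; ring
    · have : Umask ps mask - (stick ps i ::ₘ V) = Umask ps (mask ||| (1 <<< i)) - V := by
        rw [hcons, Multiset.sub_cons, Multiset.erase_cons_head]
      rwa [this]

-- B's backtracking decides the four-way split predicate
theorem bt_iff (t : Int) : ∀ (rest : List Int) (b0 b1 b2 b3 : Int), (∀ x ∈ rest, 0 ≤ x) →
    (bt t rest b0 b1 b2 b3 = true ↔
      ∃ V0 V1 V2 V3 : Multiset Int, V0 + V1 + V2 + V3 = (rest : Multiset Int) ∧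
        b0 + V0.sum = t ∧ b1 + V1.sum = t ∧ b2 + V2.sum = t ∧ b3 + V3.sum = t) := by
  intro rest
  induction rest with
  | nil =>
    intro b0 b1 b2 b3 _
    simp only [bt, Bool.and_eq_true, beq_iff_eq]
    constructor
    · rintro ⟨⟨⟨h0, h1⟩, h2⟩, h3⟩
      exact ⟨0, 0, 0, 0, by simp, by simp [h0], by simp [h1], by simp [h2], by simp [h3]⟩
    · rintro ⟨V0, V1, V2, V3, hsp, h0, h1, h2, h3⟩
      have hz : V0 + V1 + V2 + V3 = (0 : Multiset Int) := by simpa using hsp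
      have l0 : V0 ≤ V0 + V1 + V2 + V3 := calc V0 ≤ V0 + V1 := Multiset.le_add_right _ _
        _ ≤ V0 + V1 + V2 := Multiset.le_add_right _ _
        _ ≤ V0 + V1 + V2 + V3 := Multiset.le_add_right _ _
      have l1 : V1 ≤ V0 + V1 + V2 + V3 := calc V1 ≤ V0 + V1 := Multiset.le_add_left _ _
        _ ≤ V0 + V1 + V2 := Multiset.le_add_right _ _
        _ ≤ V0 + V1 + V2 + V3 := Multiset.le_add_right _ _
      have l2 : V2 ≤ V0 + V1 + V2 + V3 := calc V2 ≤ V0 + V1 + V2 := Multiset.le_add_left _ _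
        _ ≤ V0 + V1 + V2 + V3 := Multiset.le_add_right _ _
      have l3 : V3 ≤ V0 + V1 + V2 + V3 := Multiset.le_add_left _ _
      rw [hz] at l0 l1 l2 l3
      rw [Multiset.le_zero.mp l0] at h0
      rw [Multiset.le_zero.mp l1] at h1
      rw [Multiset.le_zero.mp l2] at h2
      rw [Multiset.le_zero.mp l3] at h3
      simp at h0 h1 h2 h3
      exact ⟨⟨⟨h0, h1⟩, h2⟩, h3⟩
  | cons p rest ih =>
    intro b0 b1 b2 b3 hnn
    have hp : 0 ≤ p := hnn p (List.mem_cons_self)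
    have hrest : ∀ x ∈ rest, 0 ≤ x := fun x hx => hnn x (List.mem_cons_of_mem _ hx)
    have hcoe : ((p :: rest : List Int) : Multiset Int) = p ::ₘ (rest : Multiset Int) := rfl
    simp only [bt, Bool.or_eq_true, Bool.and_eq_true, decide_eq_true_eq, ih _ _ _ _ hrest]
    constructor
    · intro h
      rcases h with ((⟨hg, V0, V1, V2, V3, hs, h0, h1, h2, h3⟩ | ⟨hg, V0, V1, V2, V3, hs, h0, h1, h2, h3⟩) |
          ⟨hg, V0, V1, V2, V3, hs, h0, h1, h2, h3⟩) | ⟨hg, V0, V1, V2, V3, hs, h0, h1, h2, h3⟩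
      · refine ⟨p ::ₘ V0, V1, V2, V3, ?_, by rw [Multiset.sum_cons]; linarith, h1, h2, h3⟩
        rw [hcoe, ← hs]
        simp only [← Multiset.singleton_add]; abel
      · refine ⟨V0, p ::ₘ V1, V2, V3, ?_, h0, by rw [Multiset.sum_cons]; linarith, h2, h3⟩
        rw [hcoe, ← hs]
        simp only [← Multiset.singleton_add]; abel
      · refine ⟨V0, V1, p ::ₘ V2, V3, ?_, h0, h1, by rw [Multiset.sum_cons]; linarith, h3⟩
        rw [hcoe, ← hs]
        simp only [← Multiset.singleton_add]; abel
      · refine ⟨V0, V1, V2, p ::ₘ V3, ?_, h0, h1, h2, by rw [Multiset.sum_cons]; linarith⟩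
        rw [hcoe, ← hs]
        simp only [← Multiset.singleton_add]; abel
    · rintro ⟨V0, V1, V2, V3, hs, h0, h1, h2, h3⟩
      have hmem : p ∈ V0 + V1 + V2 + V3 := by rw [hs, hcoe]; exact Multiset.mem_cons_self _ _
      have hVnn : ∀ x ∈ V0 + V1 + V2 + V3, 0 ≤ x := by
        intro x hx; rw [hs, hcoe] at hx
        rcases Multiset.mem_cons.mp hx with rfl | hx
        · exact hp
        · exact hrest x (by simpa using hx)
      have key : ∀ (W : Multiset Int), p ∈ W → W ≤ V0 + V1 + V2 + V3 →
          0 ≤ (W.erase p).sum ∧ p + (W.erase p).sum = W.sum := by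
        intro W hpW hW
        constructor
        · apply Multiset.sum_nonneg
          intro x hx
          exact hVnn x (Multiset.mem_of_le hW (Multiset.mem_of_mem_erase hx))
        · conv_rhs => rw [← Multiset.cons_erase hpW]
          simp
      have l0 : V0 ≤ V0 + V1 + V2 + V3 := calc V0 ≤ V0 + V1 := Multiset.le_add_right _ _
        _ ≤ V0 + V1 + V2 := Multiset.le_add_right _ _
        _ ≤ V0 + V1 + V2 + V3 := Multiset.le_add_right _ _
      have l1 : V1 ≤ V0 + V1 + V2 + V3 := calc V1 ≤ V0 + V1 := Multiset.le_add_left _ _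
        _ ≤ V0 + V1 + V2 := Multiset.le_add_right _ _
        _ ≤ V0 + V1 + V2 + V3 := Multiset.le_add_right _ _
      have l2 : V2 ≤ V0 + V1 + V2 + V3 := calc V2 ≤ V0 + V1 + V2 := Multiset.le_add_left _ _
        _ ≤ V0 + V1 + V2 + V3 := Multiset.le_add_right _ _
      have l3 : V3 ≤ V0 + V1 + V2 + V3 := Multiset.le_add_left _ _
      simp only [Multiset.mem_add] at hmem
      rcases hmem with ((hpV | hpV) | hpV) | hpV
      · obtain ⟨hnn0, hps0⟩ := key V0 hpV l0
        left; left; left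
        refine ⟨by linarith, V0.erase p, V1, V2, V3, ?_, by linarith, h1, h2, h3⟩
        have he : p ::ₘ (V0.erase p + V1 + V2 + V3) = p ::ₘ (rest : Multiset Int) := by
          rw [← hcoe, ← hs]
          conv_rhs => rw [← Multiset.cons_erase hpV]
          simp only [← Multiset.singleton_add]; abel
        exact (Multiset.cons_inj_right p).mp he
      · obtain ⟨hnn0, hps0⟩ := key V1 hpV l1
        left; left; right
        refine ⟨by linarith, V0, V1.erase p, V2, V3, ?_, h0, by linarith, h2, h3⟩
        have he : p ::ₘ (V0 + V1.erase p + V2 + V3) = p ::ₘ (rest : Multiset Int) := by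
          rw [← hcoe, ← hs]
          conv_rhs => rw [← Multiset.cons_erase hpV]
          simp only [← Multiset.singleton_add]; abel
        exact (Multiset.cons_inj_right p).mp he
      · obtain ⟨hnn0, hps0⟩ := key V2 hpV l2
        left; right
        refine ⟨by linarith, V0, V1, V2.erase p, V3, ?_, h0, h1, by linarith, h3⟩
        have he : p ::ₘ (V0 + V1 + V2.erase p + V3) = p ::ₘ (rest : Multiset Int) := by
          rw [← hcoe, ← hs]
          conv_rhs => rw [← Multiset.cons_erase hpV]
          simp only [← Multiset.singleton_add]; abel
        exact (Multiset.cons_inj_right p).mp he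
      · obtain ⟨hnn0, hps0⟩ := key V3 hpV l3
        right
        refine ⟨by linarith, V0, V1, V2, V3.erase p, ?_, h0, h1, h2, by linarith⟩
        have he : p ::ₘ (V0 + V1 + V2 + V3.erase p) = p ::ₘ (rest : Multiset Int) := by
          rw [← hcoe, ← hs]
          conv_rhs => rw [← Multiset.cons_erase hpV]
          simp only [← Multiset.singleton_add]; abel
        exact (Multiset.cons_inj_right p).mp he

theorem Q_four (t : Int) (M : Multiset Int) (hsum : M.sum = 4 * t) :
    Q t M t 4 ↔
      ∃ V0 V1 V2 V3 : Multiset Int, V0 + V1 + V2 + V3 = M ∧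
        V0.sum = t ∧ V1.sum = t ∧ V2.sum = t ∧ V3.sum = t := by
  constructor
  · rintro ⟨V0, hV0, hs0, V1, hV1, hs1, V2, hV2, hs2, V3, hV3, hs3, -⟩
    have e0 : V0 + (M - V0) = M := by
      rw [add_comm]; exact tsub_add_cancel_of_le hV0
    have e1 : V1 + (M - V0 - V1) = M - V0 := by
      rw [add_comm]; exact tsub_add_cancel_of_le hV1
    have e2 : V2 + (M - V0 - V1 - V2) = M - V0 - V1 := by
      rw [add_comm]; exact tsub_add_cancel_of_le hV2
    have e3 : V3 + (M - V0 - V1 - V2 - V3) = M - V0 - V1 - V2 := by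
      rw [add_comm]; exact tsub_add_cancel_of_le hV3
    set L := M - V0 - V1 - V2 - V3 with hL
    have hLsum : L.sum = 0 := by
      have s0 := congrArg Multiset.sum e0
      have s1 := congrArg Multiset.sum e1
      have s2 := congrArg Multiset.sum e2
      have s3 := congrArg Multiset.sum e3
      simp only [Multiset.sum_add] at s0 s1 s2 s3
      omega
    refine ⟨V0, V1, V2, V3 + L, ?_, hs0, hs1, hs2, by rw [Multiset.sum_add, hs3, hLsum]; ring⟩
    calc V0 + V1 + V2 + (V3 + L) = V0 + (V1 + (V2 + (V3 + L))) := by abel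
      _ = M := by rw [e3, e2, e1, e0]
  · rintro ⟨V0, V1, V2, V3, hsp, h0, h1, h2, h3⟩
    have hM : M = V0 + (V1 + (V2 + V3)) := by rw [← hsp]; abel
    refine ⟨V0, ?_, h0, V1, ?_, h1, V2, ?_, h2, V3, ?_, h3, trivial⟩
    · rw [hM]; exact Multiset.le_add_right _ _
    · rw [hM, add_tsub_cancel_left]; exact Multiset.le_add_right _ _
    · rw [hM, add_tsub_cancel_left, add_tsub_cancel_left]; exact Multiset.le_add_right _ _
    · rw [hM, add_tsub_cancel_left, add_tsub_cancel_left, add_tsub_cancel_left]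

-- the all-zero case (t = 0)
theorem cfs_zero (ps : List Int) (n : Nat) :
    ∀ (k : Nat) (count : Int) (fuel : Nat), count = 4 - (k : Int) → k ≤ 4 → k + 1 ≤ fuel →
      (cfs ps 0 n fuel 0 0 count PySem.Dict.empty).1 = true := by
  intro k
  induction k with
  | zero =>
    intro count fuel hc _ hf
    match fuel, hf with
    | f + 1, _ =>
      simp only [cfs]
      have : PySem.Dict.get? (PySem.Dict.empty : PySem.Dict Nat Bool) 0 = none := by
        simp [PySem.Dict.get?, PySem.Dict.empty]
      rw [this]
      have hc4 : count = 4 := by push_cast at hc; omega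
      simp [hc4]
  | succ k ih =>
    intro count fuel hc hk hf
    match fuel, hf with
    | f + 1, hf =>
      simp only [cfs]
      have : PySem.Dict.get? (PySem.Dict.empty : PySem.Dict Nat Bool) 0 = none := by
        simp [PySem.Dict.get?, PySem.Dict.empty]
      rw [this]
      have hc4 : ¬ (count = 4) := by omega
      simp only [hc4, if_false, lt_irrefl, if_true]
      exact ih (count + 1) f (by push_cast at hc ⊢; omega) (by omega) (by omega)

theorem bt_zero : ∀ (rest : List Int), (∀ x ∈ rest, x = 0) → bt 0 rest 0 0 0 0 = true := by
  intro rest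
  induction rest with
  | nil => simp [bt]
  | cons p rest ih =>
    intro h
    have hp : p = 0 := h p List.mem_cons_self
    simp only [bt, hp, Bool.or_eq_true, Bool.and_eq_true, decide_eq_true_eq]
    exact Or.inl (Or.inl (Or.inl ⟨by omega, by simpa using ih (fun x hx => h x (List.mem_cons_of_mem _ hx))⟩))

-- A's inner loop, given correctness of the recursive calls at fuel f
theorem cfsLoop_main (ps : List Int) (t : Int) (ht : 0 < t) (hps : ∀ x ∈ ps, 0 ≤ x) (f : Nat)
    (IH : ∀ mask cs count dp,
      (idxs ps.length mask).length + (4 - count).toNat + 1 ≤ f →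
      Valid ps t mask cs count → MemoInv ps t dp →
      (((cfs ps t ps.length f mask cs count dp).1 = true) ↔ QA ps t mask cs count) ∧
        MemoInv ps t (cfs ps t ps.length f mask cs count dp).2) :
    ∀ (is : List Nat) (mask : Nat) (cs count : Int) (dp : PySem.Dict Nat Bool),
      (∀ i ∈ is, i < ps.length) →
      Valid ps t mask cs count → cs < t → count < 4 →
      (idxs ps.length mask).length + (4 - count).toNat ≤ f →
      ((∃ i ∈ is, ¬ mask.testBit i ∧ cs + stick ps i ≤ t ∧
          QA ps t (mask ||| (1 <<< i)) (cs + stick ps i) count) ↔ QA ps t mask cs count) →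
      MemoInv ps t dp →
      (((cfsLoop ps t ps.length f mask cs count is dp).1 = true) ↔ QA ps t mask cs count) ∧
        MemoInv ps t (cfsLoop ps t ps.length f mask cs count is dp).2 := by
  intro is
  induction is with
  | nil =>
    intro mask cs count dp _ hv hcst _ _ hiff hinv
    have hnQA : ¬ QA ps t mask cs count := by
      rw [← hiff]; simp
    simp only [cfsLoop]
    refine ⟨by simp [hnQA], ?_⟩
    intro m v hget
    rcases eq_or_ne m mask with rfl | hne
    · rw [PySem.Dict.get?_insert_self] at hget
      cases hget
      exact ⟨cs, count, hv, hcst, by simp [hnQA]⟩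
    · rw [PySem.Dict.get?_insert_of_ne _ _ hne] at hget
      exact hinv m v hget
  | cons i is ihl =>
    intro mask cs count dp hm hv hcst hc4 hfuel hiff hinv
    have hi : i < ps.length := hm i List.mem_cons_self
    have hm' : ∀ j ∈ is, j < ps.length := fun j hj => hm j (List.mem_cons_of_mem _ hj)
    simp only [cfsLoop]
    have hstick : (PySem.List.pyGet? ps (i : Int)).getD 0 = stick ps i := rfl
    rw [hstick]
    by_cases hg : (mask &&& (1 <<< i) = 0 ∧ cs + stick ps i ≤ t)
    · rw [if_pos hg]
      have hbit : ¬ mask.testBit i := (and_two_pow_eq_zero mask i).mp hg.1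
      have hcons := Umask_cons ps mask i hi hbit
      have hpnn : 0 ≤ stick ps i := hps _ (stick_mem ps i hi)
      obtain ⟨hsum, hcs0, _, hcnt0, hcnt4, _⟩ := hv
      have hv' : Valid ps t (mask ||| (1 <<< i)) (cs + stick ps i) count := by
        refine ⟨?_, by omega, hg.2, hcnt0, hcnt4, by omega⟩
        have : (Umask ps mask).sum = stick ps i + (Umask ps (mask ||| (1 <<< i))).sum := by
          rw [hcons]; simp
        omega
      have hfcall : (idxs ps.length (mask ||| (1 <<< i))).length + (4 - count).toNat + 1 ≤ f := by
        have := idxs_length_or ps.length mask i hi hbit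
        omega
      obtain ⟨hiff', hinv'⟩ := IH (mask ||| (1 <<< i)) (cs + stick ps i) count dp hfcall hv' hinv
      rcases hres : cfs ps t ps.length f (mask ||| (1 <<< i)) (cs + stick ps i) count dp with ⟨r, dp'⟩
      rw [hres] at hiff' hinv'
      cases r with
      | true =>
        have hQA' : QA ps t (mask ||| (1 <<< i)) (cs + stick ps i) count := hiff'.mp rfl
        have hQA : QA ps t mask cs count := hiff.mp ⟨i, List.mem_cons_self, hbit, hg.2, hQA'⟩
        refine ⟨by simp [hQA], ?_⟩
        intro m v hget
        rcases eq_or_ne m mask with rfl | hne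
        · rw [PySem.Dict.get?_insert_self] at hget
          cases hget
          exact ⟨cs, count, ⟨hsum, hcs0, by omega, hcnt0, hcnt4, by omega⟩, hcst, by simp [hQA]⟩
        · rw [PySem.Dict.get?_insert_of_ne _ _ hne] at hget
          exact hinv' m v hget
      | false =>
        have hnQA' : ¬ QA ps t (mask ||| (1 <<< i)) (cs + stick ps i) count := by
          rw [← hiff']; simp
        have hiff2 : (∃ j ∈ is, ¬ mask.testBit j ∧ cs + stick ps j ≤ t ∧
            QA ps t (mask ||| (1 <<< j)) (cs + stick ps j) count) ↔ QA ps t mask cs count := by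
          rw [← hiff]
          constructor
          · rintro ⟨j, hj, h⟩; exact ⟨j, List.mem_cons_of_mem _ hj, h⟩
          · rintro ⟨j, hj, h⟩
            rcases List.mem_cons.mp hj with rfl | hj'
            · exact absurd h.2.2 hnQA'
            · exact ⟨j, hj', h⟩
        exact ihl mask cs count dp' hm' ⟨hsum, hcs0, by omega, hcnt0, hcnt4, by omega⟩ hcst hc4 hfuel hiff2 hinv'
    · rw [if_neg hg]
      have hiff2 : (∃ j ∈ is, ¬ mask.testBit j ∧ cs + stick ps j ≤ t ∧
          QA ps t (mask ||| (1 <<< j)) (cs + stick ps j) count) ↔ QA ps t mask cs count := by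
        rw [← hiff]
        constructor
        · rintro ⟨j, hj, h⟩; exact ⟨j, List.mem_cons_of_mem _ hj, h⟩
        · rintro ⟨j, hj, h⟩
          rcases List.mem_cons.mp hj with rfl | hj'
          · exact absurd ⟨(and_two_pow_eq_zero mask j).mpr h.1, h.2.1⟩ hg
          · exact ⟨j, hj', h⟩
      exact ihl mask cs count dp hm' hv hcst hc4 hfuel hiff2 hinv

-- main lemma: A's memoized search computes QA at every reachable state
theorem cfs_main (ps : List Int) (t : Int) (ht : 0 < t) (hps : ∀ x ∈ ps, 0 ≤ x) :
    ∀ fuel mask cs count dp,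
      (idxs ps.length mask).length + (4 - count).toNat + 1 ≤ fuel →
      Valid ps t mask cs count → MemoInv ps t dp →
      (((cfs ps t ps.length fuel mask cs count dp).1 = true) ↔ QA ps t mask cs count) ∧
        MemoInv ps t (cfs ps t ps.length fuel mask cs count dp).2 := by
  intro fuel
  induction fuel using Nat.strong_induction_on with
  | _ fuel IHs =>
    intro mask cs count dp hfuel hv hinv
    match fuel, hfuel with
    | f + 1, hfuel =>
      simp only [cfs]
      rcases hget : PySem.Dict.get? dp mask with _ | v
      · -- memo miss
        obtain ⟨hsum, hcs0, hcst, hcnt0, hcnt4, hz⟩ := hv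
        by_cases h4 : count = 4
        · rw [if_pos h4]
          have : QA ps t mask cs count := by
            unfold QA
            have : ((4 : Int) - count).toNat = 0 := by omega
            rw [this]; trivial
          exact ⟨by simp [this], hinv⟩
        · rw [if_neg h4, if_neg (by omega : ¬ t < cs)]
          by_cases hct : cs = t
          · rw [if_pos hct]
            have hc3 : count ≤ 3 := by omega
            have hv' : Valid ps t mask 0 (count + 1) := by
              refine ⟨?_, le_refl 0, by omega, by omega, by omega, by omega⟩
              nlinarith [hsum]
            have hf' : (idxs ps.length mask).length + (4 - (count + 1)).toNat + 1 ≤ f := by omega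
            obtain ⟨hiff', hinv'⟩ := IHs f (by omega) mask 0 (count + 1) dp hf' hv' hinv
            refine ⟨?_, hinv'⟩
            rw [hiff']
            exact QA_unique ps t ht mask 0 (count + 1) cs count hv' ⟨hsum, hcs0, by omega, hcnt0, hcnt4, hz⟩
          · rw [if_neg hct]
            have hcst' : cs < t := by omega
            have hc4' : count < 4 := by omega
            have hstep := Q_step ps t ht hps mask cs count hcs0 hcst' hcnt0 hc4'
            apply cfsLoop_main ps t ht hps f
              (fun mask cs count dp hf hv hinv => IHs f (by omega) mask cs count dp hf hv hinv)
              (List.range ps.length) mask cs count dp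
              (fun j hj => List.mem_range.mp hj)
              ⟨hsum, hcs0, by omega, hcnt0, hcnt4, hz⟩ hcst' hc4' (by omega)
              ?_ hinv
            constructor
            · rintro ⟨j, hj, h⟩; exact hstep.mpr ⟨j, List.mem_range.mp hj, h⟩
            · intro hq
              obtain ⟨j, hjl, h⟩ := hstep.mp hq
              exact ⟨j, List.mem_range.mpr hjl, h⟩
          -- end
      · -- memo hit
        obtain ⟨cs₀, count₀, hv₀, hcst₀, hvq⟩ := hinv mask v hget
        refine ⟨?_, hinv⟩
        rw [show ((v, dp) : Bool × PySem.Dict Nat Bool).1 = v from rfl] at *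
        rw [hvq]
        exact QA_unique ps t ht mask cs₀ count₀ cs count hv₀ hv

theorem all_zero_of_sum_zero : ∀ (l : List Int), (∀ x ∈ l, 0 ≤ x) → l.sum = 0 → ∀ x ∈ l, x = 0 := by
  intro l
  induction l with
  | nil => intro _ _ x hx; cases hx
  | cons a l ih =>
    intro hnn hsum x hx
    have ha : 0 ≤ a := hnn a List.mem_cons_self
    have hl : ∀ y ∈ l, 0 ≤ y := fun y hy => hnn y (List.mem_cons_of_mem _ hy)
    have hlnn : 0 ≤ l.sum := List.sum_nonneg hl
    rw [List.sum_cons] at hsum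
    rcases List.mem_cons.mp hx with rfl | hx'
    · omega
    · exact ih hl (by omega) x hx'

theorem memoinv_empty (ps : List Int) (t : Int) : MemoInv ps t PySem.Dict.empty := by
  intro m v h
  exfalso
  simp [PySem.Dict.get?, PySem.Dict.empty] at h

theorem idxs_zero_len (n : Nat) : (idxs n 0).length = n := by
  unfold idxs
  simp [Nat.zero_testBit]

-- ===== VERDICT (by name: the statement is the Claim_ definition above) =====
theorem solve_spec : Claim_equal_solve := by
  intro palitos _ hpre
  unfold Spec_solve
  by_cases hmod : PySem.Int.mod palitos.sum 4 = 0
  · have hpre : ∀ x ∈ palitos, 0 ≤ x := by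
      rcases hpre with h | h
      · exact h
      · exact absurd hmod h
    set t := PySem.Int.floordiv palitos.sum 4 with htdef
    set ps := PySem.List.sorted palitos (fun x => x) true with hpsdef
    have hA : solve palitos = (cfs ps t ps.length (ps.length + 6) 0 0 0 PySem.Dict.empty).1 := by
      unfold solve
      rw [if_neg (not_not_intro hmod)]
    have hB : solve_alt palitos = bt t ps 0 0 0 0 := by
      unfold solve_alt
      rw [if_neg (not_not_intro hmod)]
    have hperm : List.Perm ps palitos := PySem.List.sorted_perm palitos (fun x => x) true
    have hpsnn : ∀ x ∈ ps, 0 ≤ x := fun x hx => hpre x (hperm.subset hx)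
    have hsum_eq : ps.sum = palitos.sum := hperm.sum_eq
    have h4t : palitos.sum = 4 * t := by
      have := PySem.Int.floordiv_mul_add_mod palitos.sum 4
      rw [hmod] at this
      omega
    have hsnn : 0 ≤ palitos.sum := List.sum_nonneg (fun x hx => hpre x hx)
    have ht0 : 0 ≤ t := by omega
    rcases eq_or_lt_of_le ht0 with ht | ht
    · -- t = 0 : all sticks are zero
      have hz : ∀ x ∈ ps, x = 0 :=
        all_zero_of_sum_zero ps hpsnn (by omega)
      rw [hA, hB, ← ht]
      rw [cfs_zero ps ps.length 4 0 (ps.length + 6) (by norm_num) (by omega) (by omega)]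
      rw [bt_zero ps hz]
    · -- t > 0 : both sides decide the four-way split predicate
      have hinv := memoinv_empty ps t
      have hv : Valid ps t 0 0 0 := by
        refine ⟨?_, le_refl 0, ht0, le_refl 0, by norm_num, by norm_num⟩
        rw [Umask_zero]
        simp
      have hfuel : (idxs ps.length 0).length + ((4 : Int) - 0).toNat + 1 ≤ ps.length + 6 := by
        rw [idxs_zero_len]
        norm_num
      obtain ⟨hiffA, -⟩ := cfs_main ps t ht hpsnn (ps.length + 6) 0 0 0 PySem.Dict.empty hfuel hv hinv
      have hQA0 : QA ps t 0 0 0 ↔ Q t (ps : Multiset Int) t 4 := by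
        unfold QA
        rw [Umask_zero, sub_zero]
        exact Iff.rfl
      have hiffB := bt_iff t ps 0 0 0 0 hpsnn
      have hQ4 := Q_four t (ps : Multiset Int) (by simpa [hsum_eq] using h4t)
      rw [hA, hB, Bool.eq_iff_iff, hiffA, hiffB, hQA0, hQ4]
      constructor
      · rintro ⟨V0, V1, V2, V3, hs, h0, h1, h2, h3⟩
        exact ⟨V0, V1, V2, V3, hs, by omega, by omega, by omega, by omega⟩
      · rintro ⟨V0, V1, V2, V3, hs, h0, h1, h2, h3⟩
        exact ⟨V0, V1, V2, V3, hs, by omega, by omega, by omega, by omega⟩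
  · unfold solve solve_alt
    rw [if_pos hmod, if_pos hmod]
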